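-- pv_equiv track=rewrite | github.com/eulmlk/A2SV_Solved_Problems | weekBreaks/leetcode/combination-sum-iii.py | combinationSum3
-- ===== SOURCE A (Python) =====
-- from typing import List
--
-- def combinationSum3(k: int, n: int) -> List[List[int]]:
--     result = []
--     cur = []
--
--     def comb(ind, curNum):
--         if ind > k:
--             return
--
--         if ind == k and sum(cur) == n:
--             result.append(cur.copy())
--             return
--
--         for num in range(curNum, 10):
--             cur.append(num)
--             comb(ind + 1, num + 1)
--             cur.pop()
--
--     comb(0, 1)
--     return result
-- ===== SOURCE B (Python) =====
-- from typing import List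
--
-- def combinationSum3(k: int, n: int) -> List[List[int]]:
--     if k < 0:
--         return []
--     combos = [[]]
--     for _ in range(k):
--         if not combos:
--             break
--         combos = [c + [d] for c in combos
--                   for d in range((c[-1] + 1) if c else 1, 10)]
--     return [c for c in combos if sum(c) == n]
-- ===== Notes on version B (the rewrite author's own statement) =====
-- stated objective: alternative
-- what changed: Replaces the recursive depth-first backtracker with mutable shared state by an iterative breadth-first layered build: start from [[]] and k times extend every partial combination by each larger digit, then filter the finished layer by sum == n.
import Mathlib
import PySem

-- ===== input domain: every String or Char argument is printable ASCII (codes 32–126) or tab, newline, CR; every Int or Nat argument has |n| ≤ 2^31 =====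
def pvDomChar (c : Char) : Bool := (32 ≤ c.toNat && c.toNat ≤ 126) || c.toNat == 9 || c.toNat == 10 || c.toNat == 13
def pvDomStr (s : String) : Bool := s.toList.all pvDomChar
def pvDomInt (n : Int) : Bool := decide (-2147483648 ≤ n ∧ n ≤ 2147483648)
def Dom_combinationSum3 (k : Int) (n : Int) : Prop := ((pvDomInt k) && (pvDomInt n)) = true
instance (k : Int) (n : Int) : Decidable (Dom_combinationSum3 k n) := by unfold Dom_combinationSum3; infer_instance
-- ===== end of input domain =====

-- B replaces A's recursive backtracker by an iterative breadth-first layered build + filter (objective: alternative).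

-- ===== PORT A =====
-- the nested `comb(ind, curNum)`; `result`/`cur` mutation is threaded as arguments
def pvComb (k : Int) (n : Int) (ind : Int) (curNum : Int) (cur : List Int)
    (result : List (List Int)) : List (List Int) :=
  if ind > k then result
  else if ind = k ∧ cur.sum = n then result ++ [cur]
  else (PySem.List.pyRange curNum 10 1).foldl
        (fun res num => pvComb k n (ind + 1) (num + 1) (cur ++ [num]) res) result
termination_by (k + 1 - ind).toNat
decreasing_by omega

def combinationSum3 (k : Int) (n : Int) : List (List Int) :=
  pvComb k n 0 1 [] []

-- ===== PORT B =====
-- one `c + [d] for d in range((c[-1]+1) if c else 1, 10)` step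
def pvExtend (c : List Int) : List (List Int) :=
  let start : Int := match c.getLast? with | some x => x + 1 | none => 1
  (PySem.List.pyRange start 10 1).map (fun d => c ++ [d])

-- the `for _ in range(k)` loop with its early `break` on an empty layer
def pvGrow : List (List Int) → Nat → List (List Int)
  | combos, 0 => combos
  | combos, s + 1 => if combos = [] then combos else pvGrow (combos.flatMap pvExtend) s

def combinationSum3_alt (k : Int) (n : Int) : List (List Int) :=
  if k < 0 then []
  else (pvGrow [[]] k.toNat).filter (fun c => c.sum == n)

-- ===== PRECONDITION & SPEC =====
def Spec_combinationSum3 (k : Int) (n : Int) (out : List (List Int)) : Prop := out = combinationSum3_alt k n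
instance (k : Int) (n : Int) (out : List (List Int)) : Decidable (Spec_combinationSum3 k n out) := by unfold Spec_combinationSum3; infer_instance

-- ===== CLAIM (what is proved, stated in full; the proofs are below) =====
def Claim_equal_combinationSum3 : Prop := ∀ (k : Int) (n : Int), Dom_combinationSum3 k n → Spec_combinationSum3 k n (combinationSum3 k n)

-- ===== LEMMAS AND PROOFS =====

-- all ascending digit tuples of length m with entries in [c, 9], in lexicographic order
def sTuples : Nat → Int → List (List Int)
  | 0, _ => [[]]
  | m + 1, c => (PySem.List.pyRange c 10 1).flatMap (fun a => (sTuples m (a + 1)).map (a :: ·))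

def pvStep (L : List (List Int)) : List (List Int) := L.flatMap pvExtend

lemma flatMap_sing {α β : Type} (f : α → β) (l : List α) :
    l.flatMap (fun a => [f a]) = l.map f := by
  induction l <;> simp_all

lemma extend_cons (a : Int) (l : List Int) (h : l ≠ []) :
    pvExtend (a :: l) = (pvExtend l).map (a :: ·) := by
  unfold pvExtend
  rcases List.exists_cons_of_ne_nil h with ⟨b, t, rfl⟩
  simp [List.getLast?_cons_cons, List.map_map, Function.comp]

lemma step_map_cons (a : Int) (L : List (List Int)) (h : ∀ l ∈ L, l ≠ []) :
    pvStep (L.map (a :: ·)) = (pvStep L).map (a :: ·) := by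
  induction L with
  | nil => simp [pvStep]
  | cons x xs ih =>
    have hx : x ≠ [] := h x (by simp)
    simp only [pvStep, List.map_cons, List.flatMap_cons, List.map_append] at *
    rw [extend_cons a x hx, ih (fun l hl => h l (by simp [hl]))]

lemma step_tier (m : Nat) : ∀ (a : Int),
    pvStep ((sTuples m (a + 1)).map (a :: ·)) = (sTuples (m + 1) (a + 1)).map (a :: ·) := by
  induction m with
  | zero =>
    intro a
    simp [pvStep, sTuples, pvExtend, flatMap_sing, List.map_map, Function.comp]
  | succ m ih =>
    intro a
    calc pvStep ((sTuples (m + 1) (a + 1)).map (a :: ·))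
        = (PySem.List.pyRange (a + 1) 10 1).flatMap
            (fun b => pvStep (((sTuples m (b + 1)).map (b :: ·)).map (a :: ·))) := by
          simp only [sTuples, List.map_flatMap, pvStep, List.flatMap_assoc]
      _ = (PySem.List.pyRange (a + 1) 10 1).flatMap
            (fun b => ((sTuples (m + 1) (b + 1)).map (b :: ·)).map (a :: ·)) := by
          apply List.flatMap_congr
          intro b _
          rw [step_map_cons a _ (by
            intro l hl
            rcases List.mem_map.mp hl with ⟨t, _, rfl⟩
            simp), ih b]
      _ = (sTuples (m + 2) (a + 1)).map (a :: ·) := by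
          simp only [sTuples, List.map_flatMap]

lemma step_sTuples_one (m : Nat) : pvStep (sTuples m 1) = sTuples (m + 1) 1 := by
  cases m with
  | zero => simp [pvStep, sTuples, pvExtend, flatMap_sing]
  | succ m =>
    show pvStep (sTuples (m + 1) 1) = sTuples (m + 2) 1
    calc pvStep (sTuples (m + 1) 1)
        = (PySem.List.pyRange 1 10 1).flatMap
            (fun a => pvStep ((sTuples m (a + 1)).map (a :: ·))) := by
          simp only [sTuples, pvStep, List.flatMap_assoc]
      _ = (PySem.List.pyRange 1 10 1).flatMap
            (fun a => (sTuples (m + 1) (a + 1)).map (a :: ·)) := by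
          exact List.flatMap_congr (fun a _ => step_tier m a)
      _ = sTuples (m + 2) 1 := by simp only [sTuples]

lemma sTuples_one_nil (m j : Nat) (h : sTuples m 1 = []) : sTuples (m + j) 1 = [] := by
  induction j with
  | zero => simpa using h
  | succ j ih =>
    have : sTuples (m + j + 1) 1 = pvStep (sTuples (m + j) 1) := (step_sTuples_one (m + j)).symm
    rw [show m + (j + 1) = m + j + 1 from rfl, this, ih]
    simp [pvStep]

lemma grow_sTuples (s : Nat) : ∀ (m : Nat), pvGrow (sTuples m 1) s = sTuples (m + s) 1 := by
  induction s with
  | zero => intro m; simp [pvGrow]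
  | succ s ih =>
    intro m
    rw [pvGrow]
    split
    · rename_i h
      rw [h, sTuples_one_nil m (s + 1) h]
    · rw [show (sTuples m 1).flatMap pvExtend = pvStep (sTuples m 1) from rfl,
          step_sTuples_one m, ih (m + 1)]
      congr 1
      omega

-- ---- A side ----

lemma foldl_const {α β : Type} (f : β → α → β) (h : ∀ b a, f b a = b) :
    ∀ (l : List α) (b : β), l.foldl f b = b := by
  intro l
  induction l with
  | nil => simp
  | cons x xs ih => intro b; simp only [List.foldl_cons, h]; exact ih b

lemma foldl_eq_flatMap {α β : Type} (f : List α → β → List α) (g : β → List α)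
    (h : ∀ res x, f res x = res ++ g x) :
    ∀ (l : List β) (res : List α), l.foldl f res = res ++ l.flatMap g := by
  intro l
  induction l with
  | nil => simp
  | cons x xs ih =>
    intro res
    simp only [List.foldl_cons, h, List.flatMap_cons, ih (res ++ g x), List.append_assoc]

lemma comb_eq (m : Nat) : ∀ (k n ind curNum : Int) (cur : List Int) (result : List (List Int)),
    ind ≤ k → k - ind = (m : Int) →
    pvComb k n ind curNum cur result =
      result ++ ((sTuples m curNum).map (cur ++ ·)).filter (fun l => l.sum == n) := by
  induction m with
  | zero =>
    intro k n ind curNum cur result hle hm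
    have hik : ind = k := by omega
    rw [pvComb]
    rw [if_neg (by omega : ¬ ind > k)]
    by_cases hs : cur.sum = n
    · rw [if_pos ⟨hik, hs⟩]
      simp [sTuples, hs]
    · rw [if_neg (by rintro ⟨-, h⟩; exact hs h)]
      rw [foldl_const _ (by
        intro b a
        rw [pvComb]
        rw [if_pos (by omega : ind + 1 > k)])]
      simp [sTuples, hs]
  | succ m ih =>
    intro k n ind curNum cur result hle hm
    rw [pvComb]
    rw [if_neg (by omega : ¬ ind > k), if_neg (by rintro ⟨rfl, -⟩; omega)]
    rw [foldl_eq_flatMap _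
        (fun num => ((sTuples m (num + 1)).map ((cur ++ [num]) ++ ·)).filter (fun l => l.sum == n))
        (fun res num => ih k n (ind + 1) (num + 1) (cur ++ [num]) res (by omega) (by omega))]
    congr 1
    simp only [sTuples, List.map_flatMap, List.filter_flatMap, List.map_map]
    apply List.flatMap_congr
    intro a _
    congr 1
    apply List.map_congr_left
    intro t _
    simp

-- ===== VERDICT (by name: the statement is the Claim_ definition above) =====
theorem combinationSum3_spec : Claim_equal_combinationSum3 := by
  intro k n _
  unfold Spec_combinationSum3 combinationSum3 combinationSum3_alt
  by_cases hk : k < 0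
  · rw [pvComb, if_pos (by omega : (0:Int) > k), if_pos hk]
  · rw [if_neg hk]
    rw [comb_eq k.toNat k n 0 1 [] [] (by omega) (by omega)]
    rw [show pvGrow [[]] k.toNat = sTuples k.toNat 1 from by
      have h := grow_sTuples k.toNat 0
      simpa [sTuples] using h]
    simp
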